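-- pv_equiv track=rewrite | github.com/DeKubus/geotables | geotables.py | _filter_existing
-- ===== SOURCE A (Python) =====
-- _FILTER_TABLE_ANCHOR = "*filter\n"
--
-- def _filter_table_start(iptables_content):
--     """Returns the index of the first rule in the filter table
--
--     Args:
--         iptables_content (str): The content of an iptables export
--
--     Returns:
--         int: Index of the first rule in the filter able
--     """
--     filter_anchor_index = iptables_content.find(_FILTER_TABLE_ANCHOR)
--     return iptables_content.find("-A ", filter_anchor_index)
--
-- def _filter_table_end(iptables_content):
--     """Returns the index of the end of the filter table, i.e. the last position before the COMMIT directive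
--
--     Args:
--         iptables_content (str): The content of an iptables export
--
--     Returns:
--         int: Index of the end of the filter able
--     """
--     start_index = _filter_table_start(iptables_content)
--     return iptables_content.find("COMMIT", start_index)
--
-- def _filter_table_content(iptables_content):
--     """Returns the content of the filter table
--
--     Args:
--         iptables_content (str): The content of an iptables export
--
--     Returns:
--         str: The contents of the filter table
--     """
--     start_index = _filter_table_start(iptables_content)
--     end_index = _filter_table_end(iptables_content)
--     return iptables_content[start_index:end_index]
--
-- def _filter_existing(iptables_content, interface, ipvx, chain):
--     """Filters all blocks which are already present in the allow table
--
--     Args: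
--         iptables_content (str): The content of an iptables export
--         interface (str): The interface for which the rules will be added
--         ipvx ([str]): A list of blocks to (potentially) be added
--         chain (str): The name of the chain for which the entries will be compared
--
--     Returns:
--         [str]: A filtered list of blocks which are not already present
--     """
--     to_process = _filter_table_content(iptables_content)
--     expression = "^(?=.*?(-A {chn}))(?=.*?(-i {iface}))(?=.*?(-j ACCEPT))()".format(
--         chn=chain, iface=interface
--     )
--     expression += "(?=.*?(-s {}))"
--     not_filtered = []
--     components = [
--         "-A {}".format(chain),
--         "-i {}".format(interface),
--         "-j ACCEPT",
--     ]
--     for range in ipvx: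
--         not_there = True
--         for line in to_process.split("\n"):
--             if range in line and all(x in line for x in components):
--                 not_there = False
--                 break
--         if not_there:
--             not_filtered.append(range)
--     return not_filtered
-- ===== SOURCE B (Python) =====
-- def _filter_existing(iptables_content, interface, ipvx, chain):
--     """Filters all blocks which are already present in the allow table."""
--     start = iptables_content.find("*filter\n")
--     start = iptables_content.find("-A ", start)
--     end = iptables_content.find("COMMIT", start)
--     content = iptables_content[start:end]
--     components = ["-A " + chain, "-i " + interface, "-j ACCEPT"]
--     # Scan the filter-table lines ONCE, keeping only lines that carry all
--     # three rule components; then each range only has to be searched in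
--     # those candidate lines.
--     matching = [ln for ln in content.split("\n")
--                 if all(c in ln for c in components)]
--     return [r for r in ipvx if not any(r in ln for ln in matching)]
-- ===== Notes on version B (the rewrite author's own statement) =====
-- stated objective: simpler
-- what changed: B pre-filters the filter-table lines once into the list of lines carrying all three rule components (dropping the dead regex string and the per-range re-check of the components), then keeps each range by a simple membership test over those candidate lines.
import Mathlib
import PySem

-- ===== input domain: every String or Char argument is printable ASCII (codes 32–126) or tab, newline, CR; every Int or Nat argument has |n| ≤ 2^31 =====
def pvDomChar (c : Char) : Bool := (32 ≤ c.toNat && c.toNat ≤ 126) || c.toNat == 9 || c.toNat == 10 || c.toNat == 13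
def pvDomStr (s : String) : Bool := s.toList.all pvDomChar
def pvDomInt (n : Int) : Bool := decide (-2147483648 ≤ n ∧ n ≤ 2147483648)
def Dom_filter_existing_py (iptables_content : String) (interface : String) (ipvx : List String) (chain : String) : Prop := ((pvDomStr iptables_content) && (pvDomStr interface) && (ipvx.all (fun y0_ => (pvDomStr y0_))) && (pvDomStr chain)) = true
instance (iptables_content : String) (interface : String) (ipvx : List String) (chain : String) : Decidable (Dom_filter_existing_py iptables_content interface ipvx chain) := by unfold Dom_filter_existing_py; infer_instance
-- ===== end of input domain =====

-- ===== PORT A =====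
-- B re-implements A by pre-filtering the candidate lines once; return-value equivalence only (no mutation involved).

-- _filter_table_start
def pvFilterTableStart (iptables_content : String) : Int :=
  let filter_anchor_index := PySem.Str.find iptables_content "*filter\n"
  PySem.Str.findFrom iptables_content "-A " filter_anchor_index

-- _filter_table_end
def pvFilterTableEnd (iptables_content : String) : Int :=
  let start_index := pvFilterTableStart iptables_content
  PySem.Str.findFrom iptables_content "COMMIT" start_index

-- _filter_table_content
def pvFilterTableContent (iptables_content : String) : String :=
  let start_index := pvFilterTableStart iptables_content
  let end_index := pvFilterTableEnd iptables_content
  PySem.Str.slice iptables_content (some start_index) (some end_index)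

-- the inner 'for line in …: … break' loop of A: True until a line matches, then False
def pvNotThere (range : String) (components : List String) : List String → Bool
  | [] => true
  | line :: rest =>
      if PySem.Str.isIn range line && components.all (fun x => PySem.Str.isIn x line) then
        false
      else
        pvNotThere range components rest

-- A builds a dead regex string 'expression' (never used); it is omitted as it has no effect.
def filter_existing_py (iptables_content : String) (interface : String) (ipvx : List String) (chain : String) : List String :=
  let to_process := pvFilterTableContent iptables_content
  let components := ["-A " ++ chain, "-i " ++ interface, "-j ACCEPT"]
  -- sep "\n" is a nonempty literal, so split? is always 'some'; getD never supplies the default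
  let lines := (PySem.Str.split? to_process "\n").getD []
  ipvx.foldl (fun not_filtered range =>
    if pvNotThere range components lines then not_filtered ++ [range] else not_filtered) []

-- ===== PORT B =====
def filter_existing_py_alt (iptables_content : String) (interface : String) (ipvx : List String) (chain : String) : List String :=
  let start0 := PySem.Str.find iptables_content "*filter\n"
  let start := PySem.Str.findFrom iptables_content "-A " start0
  let «end» := PySem.Str.findFrom iptables_content "COMMIT" start
  let content := PySem.Str.slice iptables_content (some start) (some «end»)
  let components := ["-A " ++ chain, "-i " ++ interface, "-j ACCEPT"]
  -- sep "\n" is a nonempty literal, so split? is always 'some'; getD never supplies the default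
  let matching := ((PySem.Str.split? content "\n").getD []).filter
    (fun ln => components.all (fun c => PySem.Str.isIn c ln))
  ipvx.filter (fun r => !(matching.any (fun ln => PySem.Str.isIn r ln)))

-- ===== PRECONDITION & SPEC =====
def Spec_filter_existing_py (iptables_content : String) (interface : String) (ipvx : List String) (chain : String) (out : List String) : Prop := out = filter_existing_py_alt iptables_content interface ipvx chain
instance (iptables_content : String) (interface : String) (ipvx : List String) (chain : String) (out : List String) : Decidable (Spec_filter_existing_py iptables_content interface ipvx chain out) := by unfold Spec_filter_existing_py; infer_instance

-- ===== CLAIM (what is proved, stated in full; the proofs are below) =====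
def Claim_equal_filter_existing_py : Prop := ∀ (iptables_content : String) (interface : String) (ipvx : List String) (chain : String), Dom_filter_existing_py iptables_content interface ipvx chain → Spec_filter_existing_py iptables_content interface ipvx chain (filter_existing_py iptables_content interface ipvx chain)

-- ===== LEMMAS AND PROOFS =====
theorem pvNotThere_eq_not_any (range : String) (components : List String) (lines : List String) :
    pvNotThere range components lines
      = !(lines.any (fun ln =>
            PySem.Str.isIn range ln && components.all (fun x => PySem.Str.isIn x ln))) := by
  induction lines with
  | nil => rfl
  | cons line rest ih =>
      show (if PySem.Str.isIn range line && components.all (fun x => PySem.Str.isIn x line)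
              then false else pvNotThere range components rest) = _
      rw [List.any_cons, Bool.not_or, ih]
      cases hc : PySem.Str.isIn range line && components.all (fun x => PySem.Str.isIn x line) <;>
        simp

theorem any_filter_eq (P Q : String → Bool) (lines : List String) :
    (lines.filter P).any Q = lines.any (fun ln => Q ln && P ln) := by
  induction lines with
  | nil => rfl
  | cons line rest ih =>
      rw [List.filter_cons]
      cases hp : P line <;> cases hq : Q line <;>
        simp [List.any_cons, ih, hp, hq]

theorem foldl_if_append_eq_filter (p : String → Bool) (xs acc : List String) :
    xs.foldl (fun not_filtered range =>
        if p range then not_filtered ++ [range] else not_filtered) acc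
      = acc ++ xs.filter p := by
  induction xs generalizing acc with
  | nil => simp
  | cons x rest ih =>
      by_cases h : p x = true
      · simp [List.foldl_cons, h, ih]
      · simp [List.foldl_cons, h, ih]

-- ===== VERDICT (by name: the statement is the Claim_ definition above) =====
theorem filter_existing_py_spec : Claim_equal_filter_existing_py := by
  intro iptables_content interface ipvx chain _
  show filter_existing_py iptables_content interface ipvx chain
      = filter_existing_py_alt iptables_content interface ipvx chain
  unfold filter_existing_py filter_existing_py_alt pvFilterTableContent pvFilterTableEnd pvFilterTableStart
  rw [foldl_if_append_eq_filter, List.nil_append]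
  apply List.filter_congr
  intro r _
  rw [pvNotThere_eq_not_any, any_filter_eq]
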